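-- pv_equiv track=rewrite | github.com/Gaurav262/TradeTool | dash.py | parse_instrument_components
-- ===== SOURCE A (Python) =====
-- def parse_instrument_components(instrument_name):
--     """
--     Parse instrument name into Market, Month, Year components
--     Returns: (market, month, year) or (None, None, None) if parsing fails
--     """
--     try:
--         instrument = instrument_name.upper()
--
--         # Extract market (SRA, ER, CRA, SON)
--         market = None
--         if instrument.startswith('SRA'):
--             market = 'SRA'
--             remaining = instrument[3:]
--         elif instrument.startswith('ER'):
--             market = 'ER'
--             remaining = instrument[2:]
--         elif instrument.startswith('CRA'):
--             market = 'CRA'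
--             remaining = instrument[3:]
--         elif instrument.startswith('SON'):
--             market = 'SON'
--             remaining = instrument[3:]
--         else:
--             return None, None, None
--
--         # Extract month (H, M, U, Z)
--         month = None
--         month_codes = ['H', 'M', 'U', 'Z']
--         for i, char in enumerate(remaining):
--             if char in month_codes:
--                 month = char
--                 year_part = remaining[i+1:]
--                 break
--
--         if not month:
--             return None, None, None
--
--         # Extract year (25, 26, 27, etc.)
--         year = None
--         # Look for 2-digit year at the end (before suffixes)
--         suffixes = ['3MS', '6MS', '12MS', '3MF', '6MF', '12MF']
--         year_string = year_part
--
--         # Remove suffix if present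
--         for suffix in suffixes:
--             if year_string.endswith(suffix):
--                 year_string = year_string[:-len(suffix)]
--                 break
--
--         # Extract 2-digit year
--         if len(year_string) >= 2 and year_string[:2].isdigit():
--             year_num = int(year_string[:2])
--             if 20 <= year_num <= 35:  # Valid range
--                 year = str(year_num)
--
--         return market, month, year
--
--     except Exception:
--         return None, None, None
-- ===== SOURCE B (Python) =====
-- def parse_instrument_components(instrument_name):
--     """
--     Parse instrument name into Market, Month, Year components
--     Returns: (market, month, year) or (None, None, None) if parsing fails
--     """
--     s = instrument_name.upper()
--     n = len(s)
--
--     # Market: dispatch on leading characters (a small trie instead of a prefix list)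
--     market = None
--     if s[:1] == 'S':
--         if s[1:3] == 'RA':
--             market = 'SRA'
--         elif s[1:3] == 'ON':
--             market = 'SON'
--     elif s[:1] == 'E':
--         if s[1:2] == 'R':
--             market = 'ER'
--     elif s[:1] == 'C':
--         if s[1:3] == 'RA':
--             market = 'CRA'
--     if market is None:
--         return None, None, None
--
--     # Month: walk a cursor to the first month code
--     i = len(market)
--     month = None
--     while i < n:
--         c = s[i]
--         i += 1
--         if c in 'HMUZ':
--             month = c
--             break
--     if month is None:
--         return None, None, None
--
--     # Year: strip a duration suffix back-to-front on the reversed tail,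
--     # then read two digits at the front of what is left
--     r = s[i:][::-1]
--     k = 0
--     if r[:2] in ('SM', 'FM'):
--         if r[2:3] in ('3', '6'):
--             k = 3
--         elif r[2:4] == '21':
--             k = 4
--     if k:
--         r = r[k:]
--     d = r[::-1][:2]
--     year = d if len(d) == 2 and d.isdigit() and 20 <= int(d) <= 35 else None
--     return market, month, year
-- ===== Notes on version B (the rewrite author's own statement) =====
-- stated objective: alternative
-- what changed: A's prefix-list if/elif chain, enumerate-and-break month scan over a sliced remainder and forward endswith suffix loop are replaced by a character-trie dispatch on the leading characters, a cursor (index) walk over the whole string for the month, and back-to-front suffix recognition by pattern matching on the reversed tail.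
import Mathlib
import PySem

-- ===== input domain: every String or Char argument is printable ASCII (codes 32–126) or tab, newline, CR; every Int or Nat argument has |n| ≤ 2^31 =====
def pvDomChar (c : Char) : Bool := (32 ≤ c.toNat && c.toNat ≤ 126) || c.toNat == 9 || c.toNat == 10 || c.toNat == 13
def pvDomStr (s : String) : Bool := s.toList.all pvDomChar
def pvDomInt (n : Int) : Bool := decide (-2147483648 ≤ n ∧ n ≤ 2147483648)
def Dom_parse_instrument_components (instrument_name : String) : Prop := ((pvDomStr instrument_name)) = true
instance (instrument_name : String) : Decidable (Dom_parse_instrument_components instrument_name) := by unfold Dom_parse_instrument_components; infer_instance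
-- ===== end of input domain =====

-- B replaces A's prefix-list if/elif chain, enumerate-and-break month scan and forward endswith suffix
-- loop by a character-trie dispatch, a cursor walk for the month, and back-to-front suffix matching on
-- the reversed tail (objective: alternative; return value only, no side effects).

-- ===== PORT A =====
-- if/elif prefix chain of A
def pvMarketA (instrument : List Char) : Option (String × List Char) :=
  if PySem.Chars.startswith instrument ['S','R','A'] then
    some ("SRA", PySem.Chars.slice instrument (some 3) none)
  else if PySem.Chars.startswith instrument ['E','R'] then
    some ("ER", PySem.Chars.slice instrument (some 2) none)
  else if PySem.Chars.startswith instrument ['C','R','A'] then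
    some ("CRA", PySem.Chars.slice instrument (some 3) none)
  else if PySem.Chars.startswith instrument ['S','O','N'] then
    some ("SON", PySem.Chars.slice instrument (some 3) none)
  else none

-- A's `for i, char in enumerate(remaining): if char in month_codes: … break`
def pvMonthGoA (remaining : List Char) : List Char → Nat → Option (Char × List Char)
  | [], _ => none
  | char :: tl, i =>
    if char ∈ ['H','M','U','Z'] then
      some (char, PySem.Chars.slice remaining (some ((i : Int) + 1)) none)
    else pvMonthGoA remaining tl (i + 1)

def pvSuffixesA : List (List Char) :=
  [['3','M','S'], ['6','M','S'], ['1','2','M','S'], ['3','M','F'], ['6','M','F'], ['1','2','M','F']]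

-- A's `for suffix in suffixes: if year_string.endswith(suffix): …; break`
def pvStripA : List (List Char) → List Char → List Char
  | [], ys => ys
  | suffix :: rest, ys =>
    if PySem.Chars.endswith ys suffix then
      PySem.Chars.slice ys none (some (-(suffix.length : Int)))
    else pvStripA rest ys

def pvYearA (year_part : List Char) : Option String :=
  let year_string := pvStripA pvSuffixesA year_part
  if 2 ≤ year_string.length ∧ PySem.Chars.strIsdigit (PySem.Chars.slice year_string none (some 2)) = true then
    match PySem.Int.ofChars? (PySem.Chars.slice year_string none (some 2)) with
    | some year_num => if 20 ≤ year_num ∧ year_num ≤ 35 then some (PySem.Int.toStr year_num) else none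
    | none => none      -- unreachable: int() on an ASCII digit string cannot fail
  else none

def parse_instrument_components (instrument_name : String) : Option String × Option String × Option String :=
  let instrument := (PySem.Str.upper instrument_name).toList
  match pvMarketA instrument with
  | none => (none, none, none)
  | some mr =>
    match pvMonthGoA mr.2 mr.2 0 with
    | none => (none, none, none)
    | some my => (some mr.1, some (String.ofList [my.1]), pvYearA my.2)

-- ===== PORT B =====
-- B's market trie: dispatch on the leading characters (string comparisons ported on code points)
def pvMarketB (s : List Char) : Option String :=
  if PySem.Chars.slice s none (some 1) = ['S'] then
    if PySem.Chars.slice s (some 1) (some 3) = ['R','A'] then some "SRA"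
    else if PySem.Chars.slice s (some 1) (some 3) = ['O','N'] then some "SON"
    else none
  else if PySem.Chars.slice s none (some 1) = ['E'] then
    if PySem.Chars.slice s (some 1) (some 2) = ['R'] then some "ER" else none
  else if PySem.Chars.slice s none (some 1) = ['C'] then
    if PySem.Chars.slice s (some 1) (some 3) = ['R','A'] then some "CRA" else none
  else none

-- B's `while i < n: c = s[i]; i += 1; if c in 'HMUZ': …` cursor walk
def pvMonthB (s : List Char) (i : Nat) : Option (Char × Nat) :=
  if h : i < s.length then
    let c := s[i]
    if c ∈ ['H','M','U','Z'] then some (c, i + 1) else pvMonthB s (i + 1)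
  else none
termination_by s.length - i

-- B's suffix length read off the reversed tail r
def pvKcore (r : List Char) : Nat :=
  if PySem.Chars.slice r none (some 2) = ['S','M'] ∨ PySem.Chars.slice r none (some 2) = ['F','M'] then
    if PySem.Chars.slice r (some 2) (some 3) = ['3'] ∨ PySem.Chars.slice r (some 2) (some 3) = ['6'] then 3
    else if PySem.Chars.slice r (some 2) (some 4) = ['2','1'] then 4
    else 0
  else 0

-- B's year step: reverse the tail (s[i:][::-1] ported as slice + List.reverse, exact), strip k, read 2 digits
def pvYearB (s : List Char) (i : Nat) : Option String :=
  let r0 := (PySem.Chars.slice s (some (i : Int)) none).reverse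
  let k := pvKcore r0
  let r := if k ≠ 0 then PySem.Chars.slice r0 (some (k : Int)) none else r0
  let d := PySem.Chars.slice r.reverse none (some 2)
  if d.length = 2 ∧ PySem.Chars.strIsdigit d = true then
    match PySem.Int.ofChars? d with
    | some v => if 20 ≤ v ∧ v ≤ 35 then some (String.ofList d) else none
    | none => none      -- unreachable: int() on an ASCII digit string cannot fail
  else none

def parse_instrument_components_alt (instrument_name : String) : Option String × Option String × Option String :=
  let s := (PySem.Str.upper instrument_name).toList
  match pvMarketB s with
  | none => (none, none, none)
  | some market =>
    match pvMonthB s market.toList.length with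
    | none => (none, none, none)
    | some cm => (some market, some (String.ofList [cm.1]), pvYearB s cm.2)

-- ===== PRECONDITION & SPEC =====
def Spec_parse_instrument_components (instrument_name : String) (out : Option String × Option String × Option String) : Prop := out = parse_instrument_components_alt instrument_name
instance (instrument_name : String) (out : Option String × Option String × Option String) : Decidable (Spec_parse_instrument_components instrument_name out) := by unfold Spec_parse_instrument_components; infer_instance

-- ===== CLAIM (what is proved, stated in full; the proofs are below) =====
def Claim_equal_parse_instrument_components : Prop := ∀ (instrument_name : String), Dom_parse_instrument_components instrument_name → Spec_parse_instrument_components instrument_name (parse_instrument_components instrument_name)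

-- ===== LEMMAS AND PROOFS =====

lemma pv_sw3 (a b c p1 p2 p3 : Char) (t : List Char) :
    PySem.Chars.startswith (a::b::c::t) [p1,p2,p3]
      = (decide (a = p1) && decide (b = p2) && decide (c = p3)) := by
  simp only [PySem.Chars.startswith]
  rw [Bool.eq_iff_iff]
  simp only [List.isPrefixOf, Bool.and_eq_true, beq_iff_eq, decide_eq_true_eq]
  constructor
  · rintro ⟨h1, h2, h3, -⟩; exact ⟨⟨h1.symm, h2.symm⟩, h3.symm⟩
  · rintro ⟨⟨h1, h2⟩, h3⟩; exact ⟨h1.symm, h2.symm, h3.symm, trivial⟩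

lemma pv_sw2 (a b p1 p2 : Char) (t : List Char) :
    PySem.Chars.startswith (a::b::t) [p1,p2] = (decide (a = p1) && decide (b = p2)) := by
  simp only [PySem.Chars.startswith]
  rw [Bool.eq_iff_iff]
  simp only [List.isPrefixOf, Bool.and_eq_true, beq_iff_eq, decide_eq_true_eq]
  constructor
  · rintro ⟨h1, h2, -⟩; exact ⟨h1.symm, h2.symm⟩
  · rintro ⟨h1, h2⟩; exact ⟨h1.symm, h2.symm, trivial⟩

set_option maxHeartbeats 1000000 in
lemma pv_market_bridge (s : List Char) :
    pvMarketA s = (pvMarketB s).map (fun m => (m, s.drop m.toList.length)) := by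
  have lSRA : ("SRA" : String).toList.length = 3 := rfl
  have lSON : ("SON" : String).toList.length = 3 := rfl
  have lER : ("ER" : String).toList.length = 2 := rfl
  have lCRA : ("CRA" : String).toList.length = 3 := rfl
  have mSRA : ("SRA" : String).length = 3 := rfl
  have mSON : ("SON" : String).length = 3 := rfl
  have mER : ("ER" : String).length = 2 := rfl
  have mCRA : ("CRA" : String).length = 3 := rfl
  rcases s with _ | ⟨a, _ | ⟨b, _ | ⟨c, t⟩⟩⟩
  · rfl
  · have e1 : PySem.Chars.slice [a] none (some 1) = [a] := by
      rw [PySem.Chars.slice_eq_listSlice, PySem.List.slice_to _ (by norm_num)]; rfl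
    have e13 : PySem.Chars.slice [a] (some 1) (some 3) = [] := by
      rw [PySem.Chars.slice_eq_listSlice, PySem.List.slice_toNat _ (by norm_num) (by norm_num)]; rfl
    have e12 : PySem.Chars.slice [a] (some 1) (some 2) = [] := by
      rw [PySem.Chars.slice_eq_listSlice, PySem.List.slice_toNat _ (by norm_num) (by norm_num)]; rfl
    have sw0 : ∀ p : List Char, 2 ≤ p.length → PySem.Chars.startswith [a] p = false := by
      intro p hp
      rw [Bool.eq_false_iff, Ne, PySem.Chars.startswith_iff]
      intro hpre
      have := hpre.length_le
      simp at this; omega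
    simp only [pvMarketA, pvMarketB, e1, e13, e12, sw0 ['S','R','A'] (by norm_num), sw0 ['E','R'] (by norm_num), sw0 ['C','R','A'] (by norm_num), sw0 ['S','O','N'] (by norm_num)]
    by_cases ha : a = 'S' <;> by_cases he : a = 'E' <;> by_cases hc : a = 'C' <;> simp_all
  · have e1 : PySem.Chars.slice (a::b::[]) none (some 1) = [a] := by
      rw [PySem.Chars.slice_eq_listSlice, PySem.List.slice_to _ (by norm_num)]; rfl
    have e13 : PySem.Chars.slice (a::b::[]) (some 1) (some 3) = [b] := by
      rw [PySem.Chars.slice_eq_listSlice, PySem.List.slice_toNat _ (by norm_num) (by norm_num)]; rfl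
    have e12 : PySem.Chars.slice (a::b::[]) (some 1) (some 2) = [b] := by
      rw [PySem.Chars.slice_eq_listSlice, PySem.List.slice_toNat _ (by norm_num) (by norm_num)]; rfl
    have e2 : PySem.Chars.slice (a::b::[]) (some 2) none = [] := by
      rw [PySem.Chars.slice_eq_listSlice, PySem.List.slice_from _ (by norm_num)]; rfl
    have sw0 : ∀ p : List Char, 3 ≤ p.length → PySem.Chars.startswith [a,b] p = false := by
      intro p hp
      rw [Bool.eq_false_iff, Ne, PySem.Chars.startswith_iff]
      intro hpre
      have := hpre.length_le
      simp at this; omega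
    simp only [pvMarketA, pvMarketB, e1, e13, e12, e2, sw0 ['S','R','A'] (by norm_num), sw0 ['C','R','A'] (by norm_num), sw0 ['S','O','N'] (by norm_num), pv_sw2]
    by_cases ha : a = 'S' <;> by_cases he : a = 'E' <;> by_cases hc : a = 'C' <;>
      by_cases hb : b = 'R' <;> simp_all
  · have e1 : PySem.Chars.slice (a::b::c::t) none (some 1) = [a] := by
      rw [PySem.Chars.slice_eq_listSlice, PySem.List.slice_to _ (by norm_num)]; rfl
    have e13 : PySem.Chars.slice (a::b::c::t) (some 1) (some 3) = [b,c] := by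
      rw [PySem.Chars.slice_eq_listSlice, PySem.List.slice_toNat _ (by norm_num) (by norm_num)]; rfl
    have e12 : PySem.Chars.slice (a::b::c::t) (some 1) (some 2) = [b] := by
      rw [PySem.Chars.slice_eq_listSlice, PySem.List.slice_toNat _ (by norm_num) (by norm_num)]; rfl
    have e3 : PySem.Chars.slice (a::b::c::t) (some 3) none = t := by
      rw [PySem.Chars.slice_eq_listSlice, PySem.List.slice_from _ (by norm_num)]; rfl
    have e2 : PySem.Chars.slice (a::b::c::t) (some 2) none = c::t := by
      rw [PySem.Chars.slice_eq_listSlice, PySem.List.slice_from _ (by norm_num)]; rfl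
    simp only [pvMarketA, pvMarketB, e1, e13, e12, e3, e2, pv_sw3, pv_sw2]
    by_cases ha : a = 'S' <;> by_cases he : a = 'E' <;> by_cases hca : a = 'C' <;>
      by_cases hb : b = 'R' <;> by_cases ho : b = 'O' <;>
      by_cases hA : c = 'A' <;> by_cases hN : c = 'N' <;> simp_all

lemma pv_monthGoA_eq (rem : List Char) : ∀ (l : List Char) (i : Nat),
    pvMonthGoA rem l i =
      (List.findIdx? (fun c => decide (c ∈ (['H','M','U','Z'] : List Char))) l).bind
        (fun j => (l[j]?).map (fun c => (c, PySem.Chars.slice rem (some (((i + j : Nat) : Int) + 1)) none)))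
  | [], i => by simp [pvMonthGoA]
  | char :: tl, i => by
    by_cases hc : char ∈ (['H','M','U','Z'] : List Char)
    · simp only [pvMonthGoA, if_pos hc]
      rw [List.findIdx?_cons, if_pos (by simpa using hc)]
      simp
    · simp only [pvMonthGoA, if_neg hc]
      rw [pv_monthGoA_eq rem tl (i + 1)]
      rw [List.findIdx?_cons, if_neg (by simpa using hc)]
      cases hq : List.findIdx? (fun c => decide (c ∈ (['H','M','U','Z'] : List Char))) tl with
      | none => simp
      | some j =>
        simp only [Option.map_some, Option.bind_some, List.getElem?_cons_succ]
        have harith : ((i + 1 + j : Nat) : Int) = ((i + (j + 1) : Nat) : Int) := by push_cast; ring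
        rw [harith]

lemma pv_monthB_eq (s : List Char) (i : Nat) :
    pvMonthB s i =
      (List.findIdx? (fun c => decide (c ∈ (['H','M','U','Z'] : List Char))) (s.drop i)).bind
        (fun j => ((s.drop i)[j]?).map (fun c => (c, i + j + 1))) := by
  generalize hfuel : s.length - i = n
  induction n generalizing i with
  | zero =>
    rw [pvMonthB, dif_neg (by omega)]
    rw [List.drop_eq_nil_of_le (by omega)]
    simp
  | succ n ih =>
    have h : i < s.length := by omega
    rw [pvMonthB, dif_pos h]
    have hdrop : s.drop i = s[i] :: s.drop (i+1) := List.drop_eq_getElem_cons h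
    rw [hdrop, List.findIdx?_cons]
    by_cases hc : s[i] ∈ (['H','M','U','Z'] : List Char)
    · rw [if_pos hc, if_pos (by simpa using hc)]
      simp
    · rw [if_neg hc, if_neg (by simpa using hc)]
      rw [ih (i+1) (by omega)]
      cases hq : List.findIdx? (fun c => decide (c ∈ (['H','M','U','Z'] : List Char))) (s.drop (i+1)) with
      | none => simp
      | some j =>
        simp only [Option.map_some, Option.bind_some, List.getElem?_cons_succ]
        cases hg : (s.drop (i+1))[j]? with
        | none => simp
        | some c => simp only [Option.map_some, Option.some_inj, Prod.mk.injEq]; exact ⟨trivial, by omega⟩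

-- reused from previous version (compiled before)
lemma pv_slice_neg (ys : List Char) (k : Nat) (h1 : 0 < k) (h2 : k ≤ ys.length) :
    PySem.List.slice ys none (some (-(k : Int))) =
      PySem.List.slice ys none (some ((ys.length : Int) - (k : Int))) := by
  unfold PySem.List.slice PySem.List.clampIdx
  simp only []
  split_ifs <;> simp_all <;> omega

lemma pv_strip_eq : ∀ (sufs : List (List Char)), (∀ x ∈ sufs, x ≠ []) → ∀ (ys : List Char),
    pvStripA sufs ys =
      (match List.find? (fun x => PySem.Chars.endswith ys x) sufs with
      | some suffix => PySem.Chars.slice ys none (some ((ys.length : Int) - (suffix.length : Int)))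
      | none => ys)
  | [], _, ys => by simp [pvStripA]
  | suf :: rest, h, ys => by
    by_cases he : PySem.Chars.endswith ys suf = true
    · rw [List.find?_cons_of_pos he]
      simp only [pvStripA, if_pos he]
      have hsuf : suf <:+ ys := (PySem.Chars.endswith_iff ys suf).mp he
      have hlen : suf.length ≤ ys.length := hsuf.length_le
      have hpos : 0 < suf.length := List.length_pos_iff.mpr (h suf (by simp))
      simp only [PySem.Chars.slice_eq_listSlice]
      exact pv_slice_neg ys suf.length hpos hlen
    · rw [List.find?_cons_of_neg he]
      simp only [pvStripA, if_neg he]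
      exact pv_strip_eq rest (fun x hx => h x (List.mem_cons_of_mem _ hx)) ys

-- atoms
lemma pv_take_one (l : List Char) (a : Char) : l.take 1 = [a] ↔ l.head? = some a := by
  cases l <;> simp
lemma pv_take_two (l : List Char) (a b : Char) : l.take 2 = [a,b] ↔ l[0]? = some a ∧ l[1]? = some b := by
  rcases l with _ | ⟨x, _ | ⟨y, t⟩⟩ <;> simp
lemma pv_prefix3 (x y z : Char) (r : List Char) :
    [x,y,z] <+: r ↔ r.take 2 = [x,y] ∧ r[2]? = some z := by
  rcases r with _ | ⟨a, _ | ⟨b, _ | ⟨c, t⟩⟩⟩ <;> simp [List.cons_prefix_iff] <;> aesop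
lemma pv_prefix4 (x y z w : Char) (r : List Char) :
    [x,y,z,w] <+: r ↔ r.take 2 = [x,y] ∧ r[2]? = some z ∧ r[3]? = some w := by
  rcases r with _ | ⟨a, _ | ⟨b, _ | ⟨c, _ | ⟨d, t⟩⟩⟩⟩ <;> simp [List.cons_prefix_iff] <;> aesop

lemma pv_end3 (yp : List Char) (u v w : Char) :
    PySem.Chars.endswith yp [u,v,w] = true ↔ yp.reverse.take 2 = [w,v] ∧ yp.reverse[2]? = some u := by
  rw [PySem.Chars.endswith_iff, ← List.reverse_prefix]
  show [w,v,u] <+: yp.reverse ↔ _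
  exact pv_prefix3 w v u yp.reverse
lemma pv_end4 (yp : List Char) (u v w x : Char) :
    PySem.Chars.endswith yp [u,v,w,x] = true ↔
      yp.reverse.take 2 = [x,w] ∧ yp.reverse[2]? = some v ∧ yp.reverse[3]? = some u := by
  rw [PySem.Chars.endswith_iff, ← List.reverse_prefix]
  show [x,w,v,u] <+: yp.reverse ↔ _
  exact pv_prefix4 x w v u yp.reverse

lemma pv_kcore_eval (r : List Char) :
    pvKcore r =
      if r.take 2 = ['S','M'] ∨ r.take 2 = ['F','M'] then
        if r[2]? = some '3' ∨ r[2]? = some '6' then 3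
        else if r[2]? = some '2' ∧ r[3]? = some '1' then 4
        else 0
      else 0 := by
  have e1 : PySem.Chars.slice r none (some 2) = r.take 2 := by
    rw [PySem.Chars.slice_eq_listSlice, PySem.List.slice_to _ (by norm_num)]; rfl
  have e2 : PySem.Chars.slice r (some 2) (some 3) = (r.drop 2).take 1 := by
    rw [PySem.Chars.slice_eq_listSlice, PySem.List.slice_toNat _ (by norm_num) (by norm_num)]; rfl
  have e3 : PySem.Chars.slice r (some 2) (some 4) = (r.drop 2).take 2 := by
    rw [PySem.Chars.slice_eq_listSlice, PySem.List.slice_toNat _ (by norm_num) (by norm_num)]; rfl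
  unfold pvKcore
  rw [e1, e2, e3]
  simp only [pv_take_one, pv_take_two, List.head?_drop, List.getElem?_drop]

lemma pv_len_ge3 {r : List Char} {z : Char} (h : r[2]? = some z) : 3 ≤ r.length := by
  obtain ⟨h2, -⟩ := List.getElem?_eq_some_iff.mp h
  omega
lemma pv_len_ge4 {r : List Char} {z : Char} (h : r[3]? = some z) : 4 ≤ r.length := by
  obtain ⟨h2, -⟩ := List.getElem?_eq_some_iff.mp h
  omega

lemma pv_slice_sub (yp : List Char) (k : Nat) (hk : k ≤ yp.length) :
    PySem.Chars.slice yp none (some ((yp.length : Int) - (k : Int))) = yp.take (yp.length - k) := by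
  have : ((yp.length : Int) - (k : Int)) = ((yp.length - k : Nat) : Int) := by omega
  rw [this, PySem.Chars.slice_eq_listSlice, PySem.List.slice_to_natCast]

set_option maxHeartbeats 1000000 in
lemma pv_strip_bridge (yp : List Char) :
    pvStripA pvSuffixesA yp = yp.take (yp.length - pvKcore yp.reverse) := by
  rw [pv_strip_eq pvSuffixesA (by decide) yp, pv_kcore_eval]
  have hrl : yp.reverse.length = yp.length := List.length_reverse
  by_cases hMS : yp.reverse.take 2 = ['S','M']
  · have hMF : ¬ yp.reverse.take 2 = ['F','M'] := by rw [hMS]; decide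
    by_cases h3 : yp.reverse[2]? = some '3'
    · have b1 : PySem.Chars.endswith yp ['3','M','S'] = true := (pv_end3 _ _ _ _).mpr ⟨hMS, h3⟩
      rw [pvSuffixesA, List.find?_cons_of_pos b1]
      have hlen : 3 ≤ yp.length := hrl ▸ pv_len_ge3 h3
      rw [if_pos (Or.inl hMS), if_pos (Or.inl h3)]
      exact pv_slice_sub yp 3 hlen
    · by_cases h6 : yp.reverse[2]? = some '6'
      · have b1 : ¬ PySem.Chars.endswith yp ['3','M','S'] = true := by
          simp only [pv_end3]; tauto
        have b2 : PySem.Chars.endswith yp ['6','M','S'] = true := (pv_end3 _ _ _ _).mpr ⟨hMS, h6⟩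
        rw [pvSuffixesA, List.find?_cons_of_neg b1, List.find?_cons_of_pos b2]
        have hlen : 3 ≤ yp.length := hrl ▸ pv_len_ge3 h6
        rw [if_pos (Or.inl hMS), if_pos (Or.inr h6)]
        exact pv_slice_sub yp 3 hlen
      · by_cases h21 : yp.reverse[2]? = some '2' ∧ yp.reverse[3]? = some '1'
        · have b1 : ¬ PySem.Chars.endswith yp ['3','M','S'] = true := by
            simp only [pv_end3]; tauto
          have b2 : ¬ PySem.Chars.endswith yp ['6','M','S'] = true := by
            simp only [pv_end3]; tauto
          have b3 : PySem.Chars.endswith yp ['1','2','M','S'] = true :=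
            (pv_end4 _ _ _ _ _).mpr ⟨hMS, h21.1, h21.2⟩
          rw [pvSuffixesA, List.find?_cons_of_neg b1, List.find?_cons_of_neg b2,
            List.find?_cons_of_pos b3]
          have hlen : 4 ≤ yp.length := hrl ▸ pv_len_ge4 h21.2
          rw [if_pos (Or.inl hMS), if_neg (by tauto), if_pos h21]
          exact pv_slice_sub yp 4 hlen
        · have b1 : ¬ PySem.Chars.endswith yp ['3','M','S'] = true := by
            simp only [pv_end3]; tauto
          have b2 : ¬ PySem.Chars.endswith yp ['6','M','S'] = true := by
            simp only [pv_end3]; tauto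
          have b3 : ¬ PySem.Chars.endswith yp ['1','2','M','S'] = true := by
            simp only [pv_end4]; tauto
          have b4 : ¬ PySem.Chars.endswith yp ['3','M','F'] = true := by
            simp only [pv_end3]; tauto
          have b5 : ¬ PySem.Chars.endswith yp ['6','M','F'] = true := by
            simp only [pv_end3]; tauto
          have b6 : ¬ PySem.Chars.endswith yp ['1','2','M','F'] = true := by
            simp only [pv_end4]; tauto
          rw [pvSuffixesA, List.find?_cons_of_neg b1, List.find?_cons_of_neg b2,
            List.find?_cons_of_neg b3, List.find?_cons_of_neg b4, List.find?_cons_of_neg b5,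
            List.find?_cons_of_neg b6, List.find?_nil]
          rw [if_pos (Or.inl hMS), if_neg (by tauto), if_neg h21]
          simp
  · by_cases hMF : yp.reverse.take 2 = ['F','M']
    · by_cases h3 : yp.reverse[2]? = some '3'
      · have b1 : ¬ PySem.Chars.endswith yp ['3','M','S'] = true := by
          simp only [pv_end3]; tauto
        have b2 : ¬ PySem.Chars.endswith yp ['6','M','S'] = true := by
          simp only [pv_end3]; tauto
        have b3 : ¬ PySem.Chars.endswith yp ['1','2','M','S'] = true := by
          simp only [pv_end4]; tauto
        have b4 : PySem.Chars.endswith yp ['3','M','F'] = true := (pv_end3 _ _ _ _).mpr ⟨hMF, h3⟩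
        rw [pvSuffixesA, List.find?_cons_of_neg b1, List.find?_cons_of_neg b2,
          List.find?_cons_of_neg b3, List.find?_cons_of_pos b4]
        have hlen : 3 ≤ yp.length := hrl ▸ pv_len_ge3 h3
        rw [if_pos (Or.inr hMF), if_pos (Or.inl h3)]
        exact pv_slice_sub yp 3 hlen
      · by_cases h6 : yp.reverse[2]? = some '6'
        · have b1 : ¬ PySem.Chars.endswith yp ['3','M','S'] = true := by
            simp only [pv_end3]; tauto
          have b2 : ¬ PySem.Chars.endswith yp ['6','M','S'] = true := by
            simp only [pv_end3]; tauto
          have b3 : ¬ PySem.Chars.endswith yp ['1','2','M','S'] = true := by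
            simp only [pv_end4]; tauto
          have b4 : ¬ PySem.Chars.endswith yp ['3','M','F'] = true := by
            simp only [pv_end3]; tauto
          have b5 : PySem.Chars.endswith yp ['6','M','F'] = true := (pv_end3 _ _ _ _).mpr ⟨hMF, h6⟩
          rw [pvSuffixesA, List.find?_cons_of_neg b1, List.find?_cons_of_neg b2,
            List.find?_cons_of_neg b3, List.find?_cons_of_neg b4, List.find?_cons_of_pos b5]
          have hlen : 3 ≤ yp.length := hrl ▸ pv_len_ge3 h6
          rw [if_pos (Or.inr hMF), if_pos (Or.inr h6)]
          exact pv_slice_sub yp 3 hlen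
        · by_cases h21 : yp.reverse[2]? = some '2' ∧ yp.reverse[3]? = some '1'
          · have b1 : ¬ PySem.Chars.endswith yp ['3','M','S'] = true := by
              simp only [pv_end3]; tauto
            have b2 : ¬ PySem.Chars.endswith yp ['6','M','S'] = true := by
              simp only [pv_end3]; tauto
            have b3 : ¬ PySem.Chars.endswith yp ['1','2','M','S'] = true := by
              simp only [pv_end4]; tauto
            have b4 : ¬ PySem.Chars.endswith yp ['3','M','F'] = true := by
              simp only [pv_end3]; tauto
            have b5 : ¬ PySem.Chars.endswith yp ['6','M','F'] = true := by
              simp only [pv_end3]; tauto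
            have b6 : PySem.Chars.endswith yp ['1','2','M','F'] = true :=
              (pv_end4 _ _ _ _ _).mpr ⟨hMF, h21.1, h21.2⟩
            rw [pvSuffixesA, List.find?_cons_of_neg b1, List.find?_cons_of_neg b2,
              List.find?_cons_of_neg b3, List.find?_cons_of_neg b4, List.find?_cons_of_neg b5,
              List.find?_cons_of_pos b6]
            have hlen : 4 ≤ yp.length := hrl ▸ pv_len_ge4 h21.2
            rw [if_pos (Or.inr hMF), if_neg (by tauto), if_pos h21]
            exact pv_slice_sub yp 4 hlen
          · have b1 : ¬ PySem.Chars.endswith yp ['3','M','S'] = true := by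
              simp only [pv_end3]; tauto
            have b2 : ¬ PySem.Chars.endswith yp ['6','M','S'] = true := by
              simp only [pv_end3]; tauto
            have b3 : ¬ PySem.Chars.endswith yp ['1','2','M','S'] = true := by
              simp only [pv_end4]; tauto
            have b4 : ¬ PySem.Chars.endswith yp ['3','M','F'] = true := by
              simp only [pv_end3]; tauto
            have b5 : ¬ PySem.Chars.endswith yp ['6','M','F'] = true := by
              simp only [pv_end3]; tauto
            have b6 : ¬ PySem.Chars.endswith yp ['1','2','M','F'] = true := by
              simp only [pv_end4]; tauto
            rw [pvSuffixesA, List.find?_cons_of_neg b1, List.find?_cons_of_neg b2,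
              List.find?_cons_of_neg b3, List.find?_cons_of_neg b4, List.find?_cons_of_neg b5,
              List.find?_cons_of_neg b6, List.find?_nil]
            rw [if_pos (Or.inr hMF), if_neg (by tauto), if_neg h21]
            simp
    · have b1 : ¬ PySem.Chars.endswith yp ['3','M','S'] = true := by
        simp only [pv_end3]; tauto
      have b2 : ¬ PySem.Chars.endswith yp ['6','M','S'] = true := by
        simp only [pv_end3]; tauto
      have b3 : ¬ PySem.Chars.endswith yp ['1','2','M','S'] = true := by
        simp only [pv_end4]; tauto
      have b4 : ¬ PySem.Chars.endswith yp ['3','M','F'] = true := by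
        simp only [pv_end3]; tauto
      have b5 : ¬ PySem.Chars.endswith yp ['6','M','F'] = true := by
        simp only [pv_end3]; tauto
      have b6 : ¬ PySem.Chars.endswith yp ['1','2','M','F'] = true := by
        simp only [pv_end4]; tauto
      rw [pvSuffixesA, List.find?_cons_of_neg b1, List.find?_cons_of_neg b2,
        List.find?_cons_of_neg b3, List.find?_cons_of_neg b4, List.find?_cons_of_neg b5,
        List.find?_cons_of_neg b6, List.find?_nil]
      rw [if_neg (by tauto)]
      simp

def pvDigits : List Char := ['0','1','2','3','4','5','6','7','8','9']

lemma pv_digit_mem (c : Char) (h : PySem.Chars.isdigit c = true) : c ∈ pvDigits := by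
  have h1 : '0' ≤ c ∧ c ≤ '9' := by simpa [PySem.Chars.isdigit] using h
  have h2 : 48 ≤ c.toNat ∧ c.toNat ≤ 57 := by
    simpa [Char.le_def, UInt32.le_iff_toNat_le] using h1
  have key : ∀ n, c.toNat = n → c = Char.ofNat n := by
    intro n hn; rw [← hn, Char.ofNat_toNat]
  have hd : c.toNat = 48 ∨ c.toNat = 49 ∨ c.toNat = 50 ∨ c.toNat = 51 ∨ c.toNat = 52 ∨
      c.toNat = 53 ∨ c.toNat = 54 ∨ c.toNat = 55 ∨ c.toNat = 56 ∨ c.toNat = 57 := by omega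
  rcases hd with h | h | h | h | h | h | h | h | h | h <;> rw [key _ h] <;> decide

def pvChk (a b : Char) : Bool :=
  match PySem.Int.ofChars? [a, b] with
  | some n => !(decide (20 ≤ n ∧ n ≤ 35)) || decide (PySem.Int.toChars n = [a, b])
  | none => true

lemma pv_chk_all : ∀ a ∈ pvDigits, ∀ b ∈ pvDigits, pvChk a b = true := by
  intro a ha b hb
  fin_cases ha <;> fin_cases hb <;> decide

lemma pv_toStr_eq (a b : Char) (ha : a ∈ pvDigits) (hb : b ∈ pvDigits) (n : Int)
    (hoc : PySem.Int.ofChars? [a, b] = some n) (hr1 : 20 ≤ n) (hr2 : n ≤ 35) :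
    PySem.Int.toStr n = String.ofList [a, b] := by
  have h := pv_chk_all a ha b hb
  unfold pvChk at h
  rw [hoc] at h
  simp only [Bool.or_eq_true, Bool.not_eq_true', decide_eq_false_iff_not, decide_eq_true_eq] at h
  have ht : PySem.Int.toChars n = [a, b] := by
    rcases h with h | h
    · exact absurd ⟨hr1, hr2⟩ h
    · exact h
  have h2 : (PySem.Int.toStr n).toList = [a, b] := by rw [PySem.Int.toList_toStr, ht]
  calc PySem.Int.toStr n = String.ofList (PySem.Int.toStr n).toList := String.ofList_toList.symm
    _ = String.ofList [a, b] := by rw [h2]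

lemma pv_year_tail (ys : List Char) :
    (if 2 ≤ ys.length ∧ PySem.Chars.strIsdigit (PySem.Chars.slice ys none (some 2)) = true then
      match PySem.Int.ofChars? (PySem.Chars.slice ys none (some 2)) with
      | some year_num => if 20 ≤ year_num ∧ year_num ≤ 35 then some (PySem.Int.toStr year_num) else none
      | none => none
    else none) =
    (if (PySem.Chars.slice ys none (some 2)).length = 2 ∧ PySem.Chars.strIsdigit (PySem.Chars.slice ys none (some 2)) = true then
      match PySem.Int.ofChars? (PySem.Chars.slice ys none (some 2)) with
      | some n => if 20 ≤ n ∧ n ≤ 35 then some (String.ofList (PySem.Chars.slice ys none (some 2))) else none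
      | none => none
    else none) := by
  have hslice : PySem.Chars.slice ys none (some 2) = ys.take 2 := by
    rw [PySem.Chars.slice_eq_listSlice]
    have := PySem.List.slice_to ys (by norm_num : (0:Int) ≤ 2)
    simpa using this
  rw [hslice]
  have hlen : (ys.take 2).length = min 2 ys.length := List.length_take
  by_cases h2 : 2 ≤ ys.length
  · have hl2 : (ys.take 2).length = 2 := by omega
    simp only [h2, hl2, true_and]
    by_cases hd : PySem.Chars.strIsdigit (ys.take 2) = true
    · simp only [hd, if_pos trivial]
      obtain ⟨a, b, hab⟩ := List.length_eq_two.mp hl2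
      rw [hab]
      have hdig : PySem.Chars.isdigit a = true ∧ PySem.Chars.isdigit b = true := by
        rw [hab] at hd
        simpa [PySem.Chars.strIsdigit] using hd
      cases hoc : PySem.Int.ofChars? [a, b] with
      | none => rfl
      | some n =>
        by_cases hr : 20 ≤ n ∧ n ≤ 35
        · simp only [if_pos hr]
          rw [pv_toStr_eq a b (pv_digit_mem a hdig.1) (pv_digit_mem b hdig.2) n hoc hr.1 hr.2]
        · simp only [if_neg hr]
    · simp only [hd]
      simp
  · have hne : ¬ ((ys.take 2).length = 2) := by omega
    simp only [if_neg (by tauto : ¬ (2 ≤ ys.length ∧ PySem.Chars.strIsdigit (ys.take 2) = true)),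
      if_neg (by tauto : ¬ ((ys.take 2).length = 2 ∧ PySem.Chars.strIsdigit (ys.take 2) = true))]

lemma pv_year_bridge (yp : List Char) (s : List Char) (i : Nat) (h : s.drop i = yp) :
    pvYearA yp = pvYearB s i := by
  simp only [pvYearB]
  have hsi : PySem.Chars.slice s (some (i : Int)) none = yp := by
    rw [PySem.Chars.slice_eq_listSlice, PySem.List.slice_from_natCast, h]
  have hst : (if pvKcore yp.reverse ≠ 0 then
      PySem.Chars.slice yp.reverse (some ((pvKcore yp.reverse : Nat) : Int)) none
      else yp.reverse) = yp.reverse.drop (pvKcore yp.reverse) := by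
    by_cases hk : pvKcore yp.reverse = 0
    · rw [if_neg (by simpa using hk), hk]; rfl
    · rw [if_pos hk, PySem.Chars.slice_eq_listSlice, PySem.List.slice_from_natCast]
  have hrev : (yp.reverse.drop (pvKcore yp.reverse)).reverse
      = yp.take (yp.length - pvKcore yp.reverse) := by
    rw [List.drop_reverse, List.reverse_reverse]
  rw [hsi, hst, hrev]
  unfold pvYearA
  rw [pv_strip_bridge yp]
  exact pv_year_tail (yp.take (yp.length - pvKcore yp.reverse))

-- ===== VERDICT (by name: the statement is the Claim_ definition above) =====
theorem parse_instrument_components_spec : Claim_equal_parse_instrument_components := by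
  intro iname _
  unfold Spec_parse_instrument_components
  unfold parse_instrument_components parse_instrument_components_alt
  dsimp only []
  rw [pv_market_bridge]
  cases hM : pvMarketB ((PySem.Str.upper iname).toList) with
  | none => simp
  | some market =>
    simp only [Option.map_some]
    rw [pv_monthGoA_eq, pv_monthB_eq]
    cases hI : List.findIdx? (fun c => decide (c ∈ (['H','M','U','Z'] : List Char)))
        (((PySem.Str.upper iname).toList).drop market.toList.length) with
    | none => simp
    | some j =>
      simp only [Option.bind_some]
      cases hg : (((PySem.Str.upper iname).toList).drop market.toList.length)[j]? with
      | none => simp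
      | some c =>
        simp only [Option.map_some]
        have hslice : PySem.Chars.slice (((PySem.Str.upper iname).toList).drop market.toList.length)
            (some (((0 + j : Nat) : Int) + 1)) none
            = (((PySem.Str.upper iname).toList).drop market.toList.length).drop (j + 1) := by
          have : (((0 + j : Nat) : Int) + 1) = ((j + 1 : Nat) : Int) := by push_cast; ring
          rw [this, PySem.Chars.slice_eq_listSlice, PySem.List.slice_from_natCast]
        have hyear := pv_year_bridge
          ((((PySem.Str.upper iname).toList).drop market.toList.length).drop (j + 1))
          ((PySem.Str.upper iname).toList) (market.toList.length + j + 1)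
          (by rw [List.drop_drop]; ring_nf)
        rw [hslice, hyear]
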